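-- pv_equiv track=rewrite | github.com/JoshuaLee0321/line_break | HW_李熙_main.py | apart
-- ===== SOURCE A (Python) =====
-- def apart(sentence,dict):
--     x = len(sentence)
--     while x>0:
--         if sentence.isascii() and sentence.isalnum():#判斷是否為一整串的英文字或是數字
--             return sentence
--         elif x == 1:  # 如果一個字判斷不出來 還是要回傳
--             return sentence
--         elif sentence in dict:#在字典中
--             return sentence
--         else:#迴圈從最後一個字開始去除，找到了由上方回傳
--             x -= 1
--             sentence = sentence[0:x]
-- ===== SOURCE B (Python) =====
-- def apart(sentence, dict):
--     # length of the leading run of ASCII-alphanumeric characters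
--     la = 0
--     for c in sentence:
--         if c.isascii() and c.isalnum():
--             la += 1
--         else:
--             break
--     for x in range(len(sentence), 0, -1):
--         if x <= la or x == 1 or sentence[:x] in dict:
--             return sentence[:x]
-- ===== Notes on version B (the rewrite author's own statement) =====
-- stated objective: alternative
-- what changed: A repeatedly truncates the string and re-runs isascii()/isalnum() on the whole current prefix each iteration; B precomputes the length of the leading ASCII-alphanumeric run in one character pass and then scans x from len down, returning sentence[:x] as soon as x <= la, x == 1, or sentence[:x] is in dict, never mutating the string.
-- outside the precondition, e.g. on apart('', set()): A returns None, B returns None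
import Mathlib
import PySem

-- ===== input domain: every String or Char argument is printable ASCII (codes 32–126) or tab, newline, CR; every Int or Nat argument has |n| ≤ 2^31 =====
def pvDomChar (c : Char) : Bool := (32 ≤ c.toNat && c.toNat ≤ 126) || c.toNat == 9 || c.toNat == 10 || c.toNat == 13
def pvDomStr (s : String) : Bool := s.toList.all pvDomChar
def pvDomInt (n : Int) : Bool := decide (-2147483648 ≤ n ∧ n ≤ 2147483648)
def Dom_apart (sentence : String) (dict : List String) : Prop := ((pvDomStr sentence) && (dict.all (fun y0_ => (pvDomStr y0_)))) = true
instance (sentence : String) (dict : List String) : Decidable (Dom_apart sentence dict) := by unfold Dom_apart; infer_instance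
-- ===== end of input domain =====

-- B precomputes the leading ASCII-alnum run once and scans prefixes of the ORIGINAL string
-- by length, instead of A's repeated truncation re-checking isascii/isalnum on the whole
-- current prefix each iteration (objective: alternative decomposition, same dict-scan cost).


-- ===== PORT A =====
-- str.isascii(): every code point ≤ 127 (exact; hand-ported, no PySem primitive)
def pyIsascii (s : String) : Bool := s.toList.all (fun c => c.toNat ≤ 127)

-- the while-loop of A: state is (x, sentence); x = 0 is the loop exit, where Python
-- returns None (excluded by Pre_apart; "" is a placeholder there)
def apartGo (dict : List String) : Nat → String → String
  | 0, _ => ""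
  | n+1, sentence =>
    if pyIsascii sentence && PySem.Str.strIsalnum sentence then sentence
    else if n + 1 = 1 then sentence
    else if sentence ∈ dict then sentence
    else apartGo dict n (PySem.Str.slice sentence (some 0) (some (n : Int)))

def apart (sentence : String) (dict : List String) : String :=
  apartGo dict sentence.length sentence

-- ===== PORT B =====
-- per-character test of B's first loop: c.isascii() and c.isalnum()
def pvP (c : Char) : Bool := (c.toNat ≤ 127) && PySem.Chars.isalnum c

-- first loop of B: length of the leading run of ASCII-alphanumeric characters
def leadAlnum : List Char → Nat
  | [] => 0
  | c :: cs => if pvP c then leadAlnum cs + 1 else 0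

-- second loop of B: for x in range(len(sentence), 0, -1), first hit wins; falling off
-- the loop (empty sentence) is Python's None, placeholder ""
def apartAltGo (sentence : String) (dict : List String) (la : Nat) : Nat → String
  | 0 => ""
  | x+1 =>
    if x + 1 ≤ la ∨ x + 1 = 1 ∨ PySem.Str.slice sentence none (some ((x+1 : Nat) : Int)) ∈ dict
    then PySem.Str.slice sentence none (some ((x+1 : Nat) : Int))
    else apartAltGo sentence dict la x

def apart_alt (sentence : String) (dict : List String) : String :=
  apartAltGo sentence dict (leadAlnum sentence.toList) sentence.length

-- ===== PRECONDITION & SPEC =====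
-- Pre_ excludes only the empty sentence, on which A's loop never runs and Python
-- returns None, which is not a value of the declared return type str.
def Pre_apart (sentence : String) (dict : List String) : Prop := sentence ≠ ""
instance (sentence : String) (dict : List String) : Decidable (Pre_apart sentence dict) := by unfold Pre_apart; infer_instance

def pvWitness_apart : String × List String := ("ab,c", ["ab,", "x"])

def Spec_apart (sentence : String) (dict : List String) (out : String) : Prop := out = apart_alt sentence dict
instance (sentence : String) (dict : List String) (out : String) : Decidable (Spec_apart sentence dict out) := by unfold Spec_apart; infer_instance

-- ===== CLAIM (what is proved, stated in full; the proofs are below) =====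
def Claim_equal_apart : Prop := ∀ (sentence : String) (dict : List String), Dom_apart sentence dict → Pre_apart sentence dict → Spec_apart sentence dict (apart sentence dict)

-- ===== LEMMAS AND PROOFS =====

-- a prefix of length x is all-alnum iff x does not exceed the leading alnum run
theorem take_all_iff (l : List Char) :
    ∀ x : Nat, x ≤ l.length → ((l.take x).all pvP = true ↔ x ≤ leadAlnum l) := by
  induction l with
  | nil =>
    intro x hx
    have hx0 : x = 0 := by simpa using hx
    subst hx0; simp [leadAlnum]
  | cons c cs ih =>
    intro x hx
    cases x with
    | zero => simp
    | succ m =>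
      have hm : m ≤ cs.length := by simpa using hx
      by_cases hc : pvP c = true
      · simp only [List.take_succ_cons, List.all_cons, leadAlnum, hc, if_true, Bool.true_and]
        rw [ih m hm]
        omega
      · have hc' : pvP c = false := by simpa using hc
        simp [leadAlnum, hc']

-- the two per-character all-tests of A fuse into the single test pvP
theorem all_and_split (l : List Char) :
    (l.all (fun c => decide (c.toNat ≤ 127)) && l.all PySem.Chars.isalnum) = l.all pvP := by
  induction l with
  | nil => rfl
  | cons c cs ih =>
    simp only [List.all_cons, pvP, ← ih]
    cases decide (c.toNat ≤ 127) <;> cases PySem.Chars.isalnum c <;>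
      cases cs.all (fun c => decide (c.toNat ≤ 127)) <;> cases cs.all PySem.Chars.isalnum <;> rfl

-- main loop invariant: A's shrinking sentence is B's prefix of the original
set_option maxHeartbeats 1600000 in
theorem apart_main (dict : List String) :
    ∀ (n : Nat) (s t : String), t.toList = s.toList.take n → n ≤ s.toList.length →
      apartGo dict n t = apartAltGo s dict (leadAlnum s.toList) n := by
  intro n
  induction n with
  | zero => intro s t _ _; rfl
  | succ m ih =>
    intro s t ht hn
    have hpref : (PySem.Str.slice s none (some ((m+1 : Nat) : Int))).toList = s.toList.take (m+1) := by
      rw [PySem.Str.toList_slice, PySem.Chars.slice_eq_listSlice, PySem.List.slice_to_natCast]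
    have hts : t = PySem.Str.slice s none (some ((m+1 : Nat) : Int)) :=
      String.toList_inj.mp (ht.trans hpref.symm)
    subst hts
    have hne : s.toList.take (m+1) ≠ [] := by
      apply List.ne_nil_of_length_pos
      rw [List.length_take]
      omega
    have hie : (s.toList.take (m+1)).isEmpty = false := by
      simpa using hne
    have hall := take_all_iff s.toList (m+1) hn
    have keyb : (pyIsascii (PySem.Str.slice s none (some ((m+1 : Nat) : Int))) &&
        PySem.Str.strIsalnum (PySem.Str.slice s none (some ((m+1 : Nat) : Int)))) =
        (s.toList.take (m+1)).all pvP := by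
      rw [pyIsascii, PySem.Str.strIsalnum_eq, hpref]
      simp only [PySem.Chars.strIsalnum, hie, Bool.not_false, Bool.true_and]
      exact all_and_split _
    by_cases h1 : m + 1 ≤ leadAlnum s.toList
    · rw [apartGo, apartAltGo, if_pos (keyb.trans (by rw [hall.mpr h1])), if_pos (Or.inl h1)]
    · have hA1 : ¬ ((pyIsascii (PySem.Str.slice s none (some ((m+1 : Nat) : Int))) &&
          PySem.Str.strIsalnum (PySem.Str.slice s none (some ((m+1 : Nat) : Int)))) = true) := by
        rw [keyb]
        intro hcontra; exact h1 (hall.mp hcontra)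
      by_cases h2 : m + 1 = 1
      · rw [apartGo, apartAltGo, if_neg hA1, if_pos h2, if_pos (Or.inr (Or.inl h2))]
      · by_cases h3 : PySem.Str.slice s none (some ((m+1 : Nat) : Int)) ∈ dict
        · rw [apartGo, apartAltGo, if_neg hA1, if_neg h2,
            if_pos h3, if_pos (Or.inr (Or.inr h3))]
        · rw [apartGo, apartAltGo, if_neg hA1, if_neg h2, if_neg h3,
            if_neg (by rintro (h | h | h); exacts [h1 h, h2 h, h3 h])]
          apply ih
          · rw [PySem.Str.toList_slice, PySem.Chars.slice_eq_listSlice,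
              PySem.List.slice_zero_start, PySem.List.slice_to_natCast, hpref, List.take_take]
            have hmin : min m (m+1) = m := by omega
            rw [hmin]
          · omega

-- ===== VERDICT (by name: the statement is the Claim_ definition above) =====
theorem apart_spec : Claim_equal_apart := by
  intro s dict _ _
  unfold Spec_apart apart apart_alt
  have hl : s.length = s.toList.length := by simp
  rw [hl]
  exact apart_main dict s.toList.length s s (by simp) (le_refl _)
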